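-- pv_equiv track=rewrite | github.com/kouzimiso/study | Project/AutoClick/Sources/Models/main.py | set_data_position
-- ===== SOURCE A (Python) =====
-- def set_data_position(data_x=130,
--                 data_y=500, width=60, height=30):
--     data_position=[
--         [0,0,0,0],
--         [0,0,0,0],
--         [0,0,0,0],
--         [0,0,0,0]
--         ]
--
--     for loop in range(4):
--         if loop ==0:
--             data_position[loop][0] = int(data_x)
--             data_position[loop][1] = int(data_y)
--             data_position[loop][2] = int(data_x + width)
--             data_position[loop][3] = int(data_y + height)
--         else:
--             data_position[loop][0] = data_position[loop-1][0]
--             data_position[loop][1] = data_position[loop-1][1]+ height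
--             data_position[loop][2] = data_position[loop-1][2]
--             data_position[loop][3] = data_position[loop-1][3]+ height
--     return data_position
-- ===== SOURCE B (Python) =====
-- def set_data_position(data_x=130,
--                 data_y=500, width=60, height=30):
--     bx = int(data_x)
--     by = int(data_y)
--     bx2 = int(data_x + width)
--     by2 = int(data_y + height)
--     return [[bx, by + i * height, bx2, by2 + i * height] for i in range(4)]
-- ===== Notes on version B (the rewrite author's own statement) =====
-- stated objective: simpler
-- what changed: Replaces the zero-filled table mutated by a row-to-row recurrence (row i copied from row i-1 with +height) by a direct closed-form comprehension computing each row from its index.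
import Mathlib
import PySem

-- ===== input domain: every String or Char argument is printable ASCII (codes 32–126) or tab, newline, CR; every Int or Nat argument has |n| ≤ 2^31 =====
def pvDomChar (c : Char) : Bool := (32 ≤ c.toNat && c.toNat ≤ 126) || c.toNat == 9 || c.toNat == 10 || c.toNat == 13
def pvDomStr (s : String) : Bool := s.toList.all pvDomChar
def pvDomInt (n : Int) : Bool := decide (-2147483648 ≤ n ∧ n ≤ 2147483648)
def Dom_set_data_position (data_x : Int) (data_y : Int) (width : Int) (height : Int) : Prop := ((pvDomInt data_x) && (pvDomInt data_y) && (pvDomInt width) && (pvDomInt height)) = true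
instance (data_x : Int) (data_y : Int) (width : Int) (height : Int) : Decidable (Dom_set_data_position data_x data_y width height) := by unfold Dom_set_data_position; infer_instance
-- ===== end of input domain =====

-- B replaces A's mutated zero table with its row-to-row recurrence by a direct per-index closed-form comprehension (objective: simpler).

-- ===== PORT A =====
-- helper for the element assignment data_position[r][c] = v (indices here are always in range 0..3)
def pvSetRC (m : List (List Int)) (r c : Nat) (v : Int) : List (List Int) :=
  m.set r ((m.getD r []).set c v)

def pvGetRC (m : List (List Int)) (r c : Nat) : Int :=
  (m.getD r []).getD c 0

-- int() on an int argument is the identity; loop indices 0..3 are nonnegative, so .toNat is exact here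
def set_data_position (data_x : Int) (data_y : Int) (width : Int) (height : Int) : List (List Int) :=
  let data_position : List (List Int) :=
    [[0,0,0,0],[0,0,0,0],[0,0,0,0],[0,0,0,0]]
  (PySem.List.pyRange 0 4 1).foldl (fun m loop =>
    if loop == 0 then
      let m := pvSetRC m loop.toNat 0 data_x
      let m := pvSetRC m loop.toNat 1 data_y
      let m := pvSetRC m loop.toNat 2 (data_x + width)
      pvSetRC m loop.toNat 3 (data_y + height)
    else
      let m := pvSetRC m loop.toNat 0 (pvGetRC m (loop-1).toNat 0)
      let m := pvSetRC m loop.toNat 1 (pvGetRC m (loop-1).toNat 1 + height)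
      let m := pvSetRC m loop.toNat 2 (pvGetRC m (loop-1).toNat 2)
      pvSetRC m loop.toNat 3 (pvGetRC m (loop-1).toNat 3 + height)) data_position

-- ===== PORT B =====
def set_data_position_alt (data_x : Int) (data_y : Int) (width : Int) (height : Int) : List (List Int) :=
  (List.range 4).map (fun i =>
    [data_x, data_y + (i : Int) * height, data_x + width, (data_y + height) + (i : Int) * height])

-- ===== PRECONDITION & SPEC =====
def Spec_set_data_position (data_x : Int) (data_y : Int) (width : Int) (height : Int) (out : List (List Int)) : Prop := out = set_data_position_alt data_x data_y width height
instance (data_x : Int) (data_y : Int) (width : Int) (height : Int) (out : List (List Int)) : Decidable (Spec_set_data_position data_x data_y width height out) := by unfold Spec_set_data_position; infer_instance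

-- ===== CLAIM (what is proved, stated in full; the proofs are below) =====
def Claim_equal_set_data_position : Prop := ∀ (data_x : Int) (data_y : Int) (width : Int) (height : Int), Dom_set_data_position data_x data_y width height → Spec_set_data_position data_x data_y width height (set_data_position data_x data_y width height)

-- ===== LEMMAS AND PROOFS =====

-- ===== VERDICT (by name: the statement is the Claim_ definition above) =====
theorem set_data_position_spec : Claim_equal_set_data_position := by
  intro data_x data_y width height h
  clear h
  unfold Spec_set_data_position
  have hA : set_data_position data_x data_y width height =
      [[data_x, data_y, data_x + width, data_y + height],
       [data_x, data_y + height, data_x + width, data_y + height + height],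
       [data_x, data_y + height + height, data_x + width, data_y + height + height + height],
       [data_x, data_y + height + height + height, data_x + width,
        data_y + height + height + height + height]] := by
    unfold set_data_position
    rw [show PySem.List.pyRange 0 4 1 = [0, 1, 2, 3] from by rw [PySem.List.pyRange_one]; rfl]
    simp [pvSetRC, pvGetRC]
  have hB : set_data_position_alt data_x data_y width height =
      [[data_x, data_y + (0 : Int) * height, data_x + width, data_y + height + (0 : Int) * height],
       [data_x, data_y + (1 : Int) * height, data_x + width, data_y + height + (1 : Int) * height],
       [data_x, data_y + (2 : Int) * height, data_x + width, data_y + height + (2 : Int) * height],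
       [data_x, data_y + (3 : Int) * height, data_x + width, data_y + height + (3 : Int) * height]] := by
    unfold set_data_position_alt
    simp [List.range_succ]
  rw [hA, hB]
  norm_num
  omega
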